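-- pv_equiv track=rewrite | github.com/pypi-data/pypi-mirror-300 | packages/cgservo/cgservo-1.2.tar.gz/cgservo-1.2/cgservo/pca9685.py | set_bits
-- ===== SOURCE A (Python) =====
-- def set_bits(data, msb, lsb, value):
--   """
--   8bit幅のdataの指定ビットにvalueをセットした値を返す
--   """
--   if msb < lsb:
--     raise ValueError('lsb is larger than msb')
--
--   length = msb - lsb + 1
--   if value >= 2**length:
--     raise ValueError('value exceeds length')
--
--   # 指定ビットを0にする
--   for i in range(lsb, msb + 1):
--     data &= (0xFF - (1 << i))
--
--   data ^= (value << lsb)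
--   return data
-- ===== SOURCE B (Python) =====
-- def set_bits(data, msb, lsb, value):
--   """
--   8bit幅のdataの指定ビットにvalueをセットした値を返す
--   """
--   if msb < lsb:
--     raise ValueError('lsb is larger than msb')
--
--   length = msb - lsb + 1
--   if value >= 2**length:
--     raise ValueError('value exceeds length')
--
--   mask = ((1 << length) - 1) << lsb
--   return (data & 0xFF & ~mask) ^ (value << lsb)
-- ===== Notes on version B (the rewrite author's own statement) =====
-- stated objective: simpler
-- what changed: Replaces A's per-bit clearing loop (which recomputes 1<<i on every iteration) with a single closed-form field mask ((1<<length)-1)<<lsb, clearing the field and xoring the value in one step.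
-- intended difference: When the field starts above bit 7 (lsb >= 8), A's masks 0xFF-(1<<i) go negative and no longer clear bit i (they clear bits 8..msb-1 and keep data's bits from msb up), e.g. A returns 44 on (300,8,8,1); B truncates data to its documented 8-bit width and applies the field mask, returning 300, the intended behaviour for an 8-bit datum; the two differ exactly when data is negative or has a bit at or above msb. — e.g. on set_bits(300, 8, 8, 1): A returns 44, B returns 300
import Mathlib
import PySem

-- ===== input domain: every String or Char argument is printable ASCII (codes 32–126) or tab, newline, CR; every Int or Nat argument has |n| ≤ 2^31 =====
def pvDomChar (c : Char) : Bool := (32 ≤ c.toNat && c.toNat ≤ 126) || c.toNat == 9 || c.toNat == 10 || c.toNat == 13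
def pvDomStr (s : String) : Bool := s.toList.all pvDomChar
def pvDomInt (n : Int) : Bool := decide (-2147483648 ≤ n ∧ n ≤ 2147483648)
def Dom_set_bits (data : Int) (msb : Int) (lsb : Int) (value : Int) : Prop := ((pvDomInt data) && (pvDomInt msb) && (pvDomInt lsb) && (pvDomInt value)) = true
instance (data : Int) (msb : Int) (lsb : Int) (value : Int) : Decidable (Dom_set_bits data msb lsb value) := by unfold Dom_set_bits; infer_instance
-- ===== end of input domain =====

-- B replaces A's per-bit clearing loop by one closed-form field mask, clearing and writing the field in a single step.

-- ===== PORT A =====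
-- the body of A's for-loop: data &= (0xFF - (1 << i))
def pvMask (i : Int) : Int := 255 - ((1 : Int) <<< i.toNat)

-- A's loop 'for i in range(lsb, msb + 1): data &= (0xFF - (1 << i))'
def pvLoop (data : Int) (lsb : Int) (msb : Int) : Int :=
  (PySem.List.pyRange lsb (msb + 1) 1).foldl (fun d i => PySem.Int.band d (pvMask i)) data

def set_bits (data : Int) (msb : Int) (lsb : Int) (value : Int) : Int :=
  if msb < lsb then 0                                          -- Python: raise ValueError (outside Pre_)
  else if value ≥ (2 : Int) ^ (msb - lsb + 1).toNat then 0     -- Python: raise ValueError (outside Pre_)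
  else PySem.Int.bxor (pvLoop data lsb msb) (value <<< lsb.toNat)

-- ===== PORT B =====
def set_bits_alt (data : Int) (msb : Int) (lsb : Int) (value : Int) : Int :=
  if msb < lsb then 0                                          -- Python: raise ValueError (outside Pre_)
  else if value ≥ (2 : Int) ^ (msb - lsb + 1).toNat then 0     -- Python: raise ValueError (outside Pre_)
  else
    let mask := (((1 : Int) <<< (msb - lsb + 1).toNat) - 1) <<< lsb.toNat
    PySem.Int.bxor (PySem.Int.band (PySem.Int.band data 255) (Int.not mask)) (value <<< lsb.toNat)

-- ===== PRECONDITION & SPEC =====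
-- Exactly the inputs on which the Python A returns: msb ≥ lsb and value < 2^length
-- (else ValueError), and lsb ≥ 0 (a negative lsb makes '1 << i' raise ValueError).
def Pre_set_bits (data : Int) (msb : Int) (lsb : Int) (value : Int) : Prop :=
  0 ≤ lsb ∧ lsb ≤ msb ∧ value < (2 : Int) ^ (msb - lsb + 1).toNat

instance (data : Int) (msb : Int) (lsb : Int) (value : Int) : Decidable (Pre_set_bits data msb lsb value) := by unfold Pre_set_bits; infer_instance

def pvWitness_set_bits : Int × Int × Int × Int := (170, 5, 2, 9)

-- When the field starts above bit 7 (lsb ≥ 8), A's per-bit masks 0xFF - (1 << i) no longer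
-- clear bit i (they clear bits 8..i-1 and keep data's bits from msb up), so A returns a value
-- with the field not written into the byte; B truncates data to its documented 8-bit width and
-- applies the field mask, the intended value — the two differ exactly when data is negative or
-- has a bit at or above msb.
def D_set_bits (data : Int) (msb : Int) (lsb : Int) (value : Int) : Prop :=
  8 ≤ lsb ∧ (data < 0 ∨ (msb ≤ 31 ∧ (2 : Int) ^ msb.toNat ≤ data))

instance (data : Int) (msb : Int) (lsb : Int) (value : Int) : Decidable (D_set_bits data msb lsb value) := by unfold D_set_bits; infer_instance

def Spec_set_bits (data : Int) (msb : Int) (lsb : Int) (value : Int) (out : Int) : Prop := ¬ D_set_bits data msb lsb value → out = set_bits_alt data msb lsb value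
instance (data : Int) (msb : Int) (lsb : Int) (value : Int) (out : Int) : Decidable (Spec_set_bits data msb lsb value out) := by unfold Spec_set_bits; infer_instance

def pvDiffWitness_set_bits : Int × Int × Int × Int := (300, 8, 8, 1)
def pvDiffWitnessOut_set_bits : Int × Int := (44, 300)

-- ===== CLAIM (what is proved, stated in full; the proofs are below) =====
def Claim_unchanged_set_bits : Prop := ∀ (data : Int) (msb : Int) (lsb : Int) (value : Int), Dom_set_bits data msb lsb value → Pre_set_bits data msb lsb value → Spec_set_bits data msb lsb value (set_bits data msb lsb value)
def Claim_changed_set_bits : Prop := Dom_set_bits (pvDiffWitness_set_bits.1) (pvDiffWitness_set_bits.2.1) (pvDiffWitness_set_bits.2.2.1) (pvDiffWitness_set_bits.2.2.2) ∧ Pre_set_bits (pvDiffWitness_set_bits.1) (pvDiffWitness_set_bits.2.1) (pvDiffWitness_set_bits.2.2.1) (pvDiffWitness_set_bits.2.2.2) ∧ D_set_bits (pvDiffWitness_set_bits.1) (pvDiffWitness_set_bits.2.1) (pvDiffWitness_set_bits.2.2.1) (pvDiffWitness_set_bits.2.2.2) ∧ set_bits (pvDiffWitness_set_bits.1) (pvDiffWitness_set_bits.2.1)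 (pvDiffWitness_set_bits.2.2.1) (pvDiffWitness_set_bits.2.2.2) = pvDiffWitnessOut_set_bits.1 ∧ set_bits_alt (pvDiffWitness_set_bits.1) (pvDiffWitness_set_bits.2.1) (pvDiffWitness_set_bits.2.2.1) (pvDiffWitness_set_bits.2.2.2) = pvDiffWitnessOut_set_bits.2 ∧ pvDiffWitnessOut_set_bits.1 ≠ pvDiffWitnessOut_set_bits.2
def Claim_exact_set_bits : Prop := ∀ (data : Int) (msb : Int) (lsb : Int) (value : Int), Dom_set_bits data msb lsb value → Pre_set_bits data msb lsb value → D_set_bits data msb lsb value → set_bits data msb lsb value ≠ set_bits_alt data msb lsb value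

-- ===== LEMMAS AND PROOFS =====

lemma pvTb_ofNat (m : Nat) (i : Nat) : (Int.ofNat m).testBit i = m.testBit i := rfl
lemma pvTb_negSucc (m : Nat) (i : Nat) : (Int.negSucc m).testBit i = !m.testBit i := rfl

lemma pvSubAnd (c : Nat) : ∀ n : Nat, c - (c &&& n) = c.ldiff n := by
  induction c using Nat.binaryRec with
  | zero =>
    intro n
    apply (Nat.eq_of_testBit_eq ?_).symm
    intro i
    simp [Nat.testBit_ldiff]
  | bit b c ih =>
    intro n
    cases n using Nat.binaryRec with
    | zero =>
      apply Nat.eq_of_testBit_eq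
      intro i
      simp [Nat.testBit_ldiff]
    | bit b' n =>
      rw [Nat.land_bit, Nat.ldiff_bit, ← ih n]
      have hle : c &&& n ≤ c := Nat.and_le_left
      cases b <;> cases b' <;> simp [Nat.bit] <;> omega

def pvKill (k : Int) (i : Nat) : Bool :=
  (decide ((i : Int) = k) && decide (i ≤ 7)) || (decide (k ≤ 7) && decide (8 ≤ i)) ||
    (decide (8 ≤ i) && decide ((i : Int) < k))

lemma pvTbMask (k : Int) (hk : 0 ≤ k) (i : Nat) :
    (pvMask k).testBit i = !pvKill k i := by
  have hkk : ((k.toNat : Int)) = k := Int.toNat_of_nonneg hk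
  by_cases h7 : k ≤ 7
  · have hk7 : k.toNat ≤ 7 := by omega
    have hpow : (2 : Nat) ^ k.toNat ≤ 128 := by
      calc (2 : Nat) ^ k.toNat ≤ 2 ^ 7 := Nat.pow_le_pow_right (by norm_num) hk7
        _ ≤ 128 := by norm_num
    have hle255 : (2 : Nat) ^ k.toNat ≤ 255 := le_trans hpow (by norm_num)
    have hval : pvMask k = Int.ofNat (255 - 2 ^ k.toNat) := by
      unfold pvMask
      rw [Int.shiftLeft_eq, one_mul, Int.ofNat_eq_natCast, Nat.cast_sub hle255]
      push_cast
      ring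
    have h255 : (255 : Nat) &&& 2 ^ k.toNat = 2 ^ k.toNat := by
      have ht : (255 : Nat).testBit k.toNat = true := by
        rw [show (255 : Nat) = 2 ^ 8 - 1 from by norm_num, Nat.testBit_two_pow_sub_one]
        simpa using by omega
      rw [Nat.and_two_pow, ht]
      simp
    have hsub : (255 - 2 ^ k.toNat : Nat) = (255 : Nat).ldiff (2 ^ k.toNat) := by
      rw [← pvSubAnd, h255]
    rw [hval, pvTb_ofNat, hsub, Nat.testBit_ldiff,
      show (255 : Nat) = 2 ^ 8 - 1 from by norm_num, Nat.testBit_two_pow_sub_one,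
      Nat.testBit_two_pow]
    unfold pvKill
    by_cases hik : k.toNat = i <;> by_cases hi8 : i < 8 <;>
      simp [hik, hi8, h7, show ((i : Int) = k) ↔ (k.toNat = i) from by omega] <;> omega
  · have hk8 : 8 ≤ k.toNat := by omega
    have hpow : (256 : Nat) ≤ 2 ^ k.toNat := by
      calc (256 : Nat) = 2 ^ 8 := by norm_num
        _ ≤ 2 ^ k.toNat := Nat.pow_le_pow_right (by norm_num) hk8
    have hval : pvMask k = Int.negSucc (2 ^ k.toNat - 256) := by
      unfold pvMask
      rw [Int.shiftLeft_eq, one_mul, Int.negSucc_eq, Nat.cast_sub hpow]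
      push_cast
      ring
    have hdecomp : (2 ^ k.toNat - 256 : Nat) = 2 ^ 8 * (2 ^ (k.toNat - 8) - 1) := by
      have hk' : k.toNat = 8 + (k.toNat - 8) := by omega
      rw [Nat.mul_sub, mul_one, ← Nat.pow_add, ← hk']
      norm_num
    rw [hval, pvTb_negSucc, hdecomp, Nat.testBit_two_pow_mul, Nat.testBit_two_pow_sub_one]
    unfold pvKill
    by_cases hi8 : 8 ≤ i <;> by_cases hik : i - 8 < k.toNat - 8 <;>
      simp [hi8, hik, h7] <;> omega

lemma e2 (n : Nat) : ¬ (0:Int) ≤ Int.negSucc n := not_le.mpr (Int.negSucc_lt_zero n)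
lemma e3 (n : Nat) : (-(Int.negSucc n) - 1) = (n : Int) := by simp [Int.negSucc_eq]

lemma pvBandNN (m n : Nat) : PySem.Int.band (Int.ofNat m) (Int.ofNat n) = Int.ofNat (m &&& n) := by
  unfold PySem.Int.band
  simp only [Int.ofNat_eq_natCast]
  rw [if_pos (Int.natCast_nonneg m), if_pos (Int.natCast_nonneg n)]
  norm_num

lemma pvBandNP (m n : Nat) : PySem.Int.band (Int.ofNat m) (Int.negSucc n) = Int.ofNat (m - (m &&& n)) := by
  unfold PySem.Int.band
  simp only [Int.ofNat_eq_natCast]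
  rw [if_pos (Int.natCast_nonneg m), if_neg (e2 n), e3]
  norm_num

lemma pvBandPN (m n : Nat) : PySem.Int.band (Int.negSucc m) (Int.ofNat n) = Int.ofNat (n - (n &&& m)) := by
  unfold PySem.Int.band
  simp only [Int.ofNat_eq_natCast]
  rw [if_neg (e2 m), if_pos (Int.natCast_nonneg n), e3]
  norm_num

lemma pvBandPP (m n : Nat) : PySem.Int.band (Int.negSucc m) (Int.negSucc n) = Int.negSucc (m ||| n) := by
  unfold PySem.Int.band
  rw [if_neg (e2 m), if_neg (e2 n), e3, e3, Int.negSucc_eq]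
  norm_num
  ring

lemma pvBxorNN (m n : Nat) : PySem.Int.bxor (Int.ofNat m) (Int.ofNat n) = Int.ofNat (m ^^^ n) := by
  unfold PySem.Int.bxor
  simp only [Int.ofNat_eq_natCast]
  rw [if_pos (Int.natCast_nonneg m), if_pos (Int.natCast_nonneg n)]
  norm_num

lemma pvBxorNP (m n : Nat) : PySem.Int.bxor (Int.ofNat m) (Int.negSucc n) = Int.negSucc (m ^^^ n) := by
  unfold PySem.Int.bxor
  simp only [Int.ofNat_eq_natCast]
  rw [if_pos (Int.natCast_nonneg m), if_neg (e2 n), e3, Int.negSucc_eq]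
  norm_num
  ring

lemma pvBxorPN (m n : Nat) : PySem.Int.bxor (Int.negSucc m) (Int.ofNat n) = Int.negSucc (m ^^^ n) := by
  unfold PySem.Int.bxor
  simp only [Int.ofNat_eq_natCast]
  rw [if_neg (e2 m), if_pos (Int.natCast_nonneg n), e3, Int.negSucc_eq]
  norm_num
  ring

lemma pvBxorPP (m n : Nat) : PySem.Int.bxor (Int.negSucc m) (Int.negSucc n) = Int.ofNat (m ^^^ n) := by
  unfold PySem.Int.bxor
  rw [if_neg (e2 m), if_neg (e2 n), e3, e3]
  norm_num

lemma pvTbBand (x y : Int) (i : Nat) :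
    (PySem.Int.band x y).testBit i = (x.testBit i && y.testBit i) := by
  cases x with
  | ofNat m =>
    cases y with
    | ofNat n =>
      rw [pvBandNN, pvTb_ofNat, Nat.testBit_and, pvTb_ofNat, pvTb_ofNat]
    | negSucc n =>
      rw [pvBandNP, pvTb_ofNat, pvSubAnd, Nat.testBit_ldiff, pvTb_ofNat, pvTb_negSucc]
  | negSucc m =>
    cases y with
    | ofNat n =>
      rw [pvBandPN, pvTb_ofNat, pvSubAnd, Nat.testBit_ldiff, pvTb_ofNat, pvTb_negSucc,
        Bool.and_comm]
    | negSucc n =>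
      rw [pvBandPP, pvTb_negSucc, Nat.testBit_or, pvTb_negSucc, pvTb_negSucc]
      cases m.testBit i <;> cases n.testBit i <;> rfl

lemma pvTbBxor (x y : Int) (i : Nat) :
    (PySem.Int.bxor x y).testBit i = (x.testBit i ^^ y.testBit i) := by
  cases x with
  | ofNat m =>
    cases y with
    | ofNat n =>
      rw [pvBxorNN, pvTb_ofNat, Nat.testBit_xor, pvTb_ofNat, pvTb_ofNat]
    | negSucc n =>
      rw [pvBxorNP, pvTb_negSucc, Nat.testBit_xor, pvTb_ofNat, pvTb_negSucc]
      cases m.testBit i <;> cases n.testBit i <;> rfl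
  | negSucc m =>
    cases y with
    | ofNat n =>
      rw [pvBxorPN, pvTb_negSucc, Nat.testBit_xor, pvTb_negSucc, pvTb_ofNat]
      cases m.testBit i <;> cases n.testBit i <;> rfl
    | negSucc n =>
      rw [pvBxorPP, pvTb_ofNat, Nat.testBit_xor, pvTb_negSucc, pvTb_negSucc]
      cases m.testBit i <;> cases n.testBit i <;> rfl

lemma pvInt_ext {x y : Int} (h : ∀ i, x.testBit i = y.testBit i) : x = y := by
  cases x with
  | ofNat m =>
    cases y with
    | ofNat n =>
      have : m = n := Nat.eq_of_testBit_eq (fun i => h i)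
      simp [this]
    | negSucc n =>
      exfalso
      have hm : m.testBit (m + n) = false :=
        Nat.testBit_eq_false_of_lt (lt_of_lt_of_le Nat.lt_two_pow_self
          (Nat.pow_le_pow_right (by norm_num) (Nat.le_add_right m n)))
      have hn : n.testBit (m + n) = false :=
        Nat.testBit_eq_false_of_lt (lt_of_lt_of_le Nat.lt_two_pow_self
          (Nat.pow_le_pow_right (by norm_num) (Nat.le_add_left n m)))
      have := h (m + n)
      rw [pvTb_ofNat, pvTb_negSucc, hm, hn] at this
      exact Bool.false_ne_true this
  | negSucc m =>
    cases y with
    | ofNat n =>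
      exfalso
      have hm : m.testBit (m + n) = false :=
        Nat.testBit_eq_false_of_lt (lt_of_lt_of_le Nat.lt_two_pow_self
          (Nat.pow_le_pow_right (by norm_num) (Nat.le_add_right m n)))
      have hn : n.testBit (m + n) = false :=
        Nat.testBit_eq_false_of_lt (lt_of_lt_of_le Nat.lt_two_pow_self
          (Nat.pow_le_pow_right (by norm_num) (Nat.le_add_left n m)))
      have := h (m + n)
      rw [pvTb_negSucc, pvTb_ofNat, hm, hn] at this
      exact Bool.false_ne_true this.symm
    | negSucc n =>
      have : m = n := Nat.eq_of_testBit_eq (fun i => by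
        have := h i
        rw [pvTb_negSucc, pvTb_negSucc] at this
        exact Bool.not_inj this)
      simp [this]

lemma pvBxorCancel {a b c : Int} (h : PySem.Int.bxor a c = PySem.Int.bxor b c) : a = b := by
  apply pvInt_ext
  intro i
  have hh := congrArg (fun z => z.testBit i) h
  simp only [pvTbBxor] at hh
  cases hc : c.testBit i <;> rw [hc] at hh <;>
    cases ha : a.testBit i <;> rw [ha] at hh <;>
    cases hb : b.testBit i <;> rw [hb] at hh <;> simp_all

def pvKilled (lsb : Int) (msb : Int) (i : Nat) : Bool :=
  (decide (lsb ≤ (i : Int)) && decide ((i : Int) ≤ msb) && decide (i ≤ 7)) ||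
    (decide (lsb ≤ 7) && decide (8 ≤ i)) || (decide (8 ≤ i) && decide ((i : Int) < msb))

lemma pvKillBase (lsb : Int) (i : Nat) : pvKilled lsb lsb i = pvKill lsb i := by
  rw [Bool.eq_iff_iff]
  simp only [pvKill, pvKilled, Bool.or_eq_true, Bool.and_eq_true, decide_eq_true_eq]
  omega

lemma pvKillStep (lsb msb : Int) (hle : lsb ≤ msb - 1) (i : Nat) :
    (pvKilled lsb (msb - 1) i || pvKill msb i) = pvKilled lsb msb i := by
  rw [Bool.eq_iff_iff]
  simp only [pvKill, pvKilled, Bool.or_eq_true, Bool.and_eq_true, decide_eq_true_eq]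
  omega

lemma pvLoopTb (n : Nat) : ∀ (data lsb msb : Int), 0 ≤ lsb → msb = lsb + n →
    ∀ i, (pvLoop data lsb msb).testBit i = (data.testBit i && !pvKilled lsb msb i) := by
  induction n with
  | zero =>
    intro data lsb msb h0 hm i
    have hm' : msb = lsb := by omega
    unfold pvLoop
    rw [hm', PySem.List.pyRange_one_singleton]
    simp only [List.foldl_cons, List.foldl_nil]
    rw [pvTbBand, pvTbMask lsb h0, pvKillBase]
  | succ n ih =>
    intro data lsb msb h0 hm i
    have hsplit : PySem.List.pyRange lsb (msb + 1) 1 =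
        PySem.List.pyRange lsb msb 1 ++ [msb] := by
      exact PySem.List.pyRange_one_succ_right (by omega)
    unfold pvLoop
    rw [hsplit, List.foldl_append]
    simp only [List.foldl_cons, List.foldl_nil]
    have hprev : ∀ j, ((PySem.List.pyRange lsb msb 1).foldl
        (fun d i => PySem.Int.band d (pvMask i)) data).testBit j =
        (data.testBit j && !pvKilled lsb (msb - 1) j) := by
      intro j
      have h2 := ih data lsb (msb - 1) h0 (by omega) j
      unfold pvLoop at h2
      rw [show msb - 1 + 1 = msb from by ring] at h2
      exact h2
    rw [pvTbBand, hprev, pvTbMask msb (by omega), Bool.and_assoc, ← Bool.not_or,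
      pvKillStep lsb msb (by omega)]

lemma pvTbFieldMask (lsb msb : Int) (h0 : 0 ≤ lsb) (hlm : lsb ≤ msb) (i : Nat) :
    ((((1 : Int) <<< (msb - lsb + 1).toNat) - 1) <<< lsb.toNat).testBit i =
      (decide (lsb ≤ (i : Int)) && decide ((i : Int) ≤ msb)) := by
  have hval : (((1 : Int) <<< (msb - lsb + 1).toNat) - 1) <<< lsb.toNat =
      Int.ofNat ((2 ^ (msb - lsb + 1).toNat - 1) <<< lsb.toNat) := by
    rw [Int.shiftLeft_eq, Int.shiftLeft_eq, one_mul, Int.ofNat_eq_natCast, Nat.shiftLeft_eq,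
      Nat.cast_mul, Nat.cast_sub Nat.one_le_two_pow]
    push_cast
    ring
  rw [hval, pvTb_ofNat, Nat.shiftLeft_eq, mul_comm, Nat.testBit_two_pow_mul,
    Nat.testBit_two_pow_sub_one]
  have hlsb : ((lsb.toNat : Int)) = lsb := Int.toNat_of_nonneg h0
  have hlen : (((msb - lsb + 1).toNat : Int)) = msb - lsb + 1 := by
    rw [Int.toNat_of_nonneg (by omega)]
  by_cases hge : lsb.toNat ≤ i <;> by_cases hlt : i - lsb.toNat < (msb - lsb + 1).toNat <;>
    simp [hge, hlt] <;> omega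

lemma pvEq (data lsb msb : Int) (h0 : 0 ≤ lsb) (hlm : lsb ≤ msb)
    (hcase : lsb ≤ 7 ∨ (0 ≤ data ∧ data < (2 : Int) ^ msb.toNat)) :
    pvLoop data lsb msb = PySem.Int.band (PySem.Int.band data 255)
      (Int.not ((((1 : Int) <<< (msb - lsb + 1).toNat) - 1) <<< lsb.toNat)) := by
  apply pvInt_ext
  intro i
  rw [pvLoopTb (msb - lsb).toNat data lsb msb h0 (by omega) i, pvTbBand, pvTbBand]
  have hnot : ∀ (x : Int) (j : Nat), (Int.not x).testBit j = !x.testBit j := by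
    intro x j
    cases x with
    | ofNat m => rfl
    | negSucc m =>
      rw [show Int.not (Int.negSucc m) = Int.ofNat m from rfl, pvTb_ofNat, pvTb_negSucc,
        Bool.not_not]
  rw [hnot, pvTbFieldMask lsb msb h0 hlm]
  have h255 : (255 : Int).testBit i = decide (i < 8) := by
    rw [show (255 : Int) = Int.ofNat 255 from rfl, pvTb_ofNat,
      show (255 : Nat) = 2 ^ 8 - 1 from by norm_num, Nat.testBit_two_pow_sub_one]
  rw [h255]
  cases hdb : data.testBit i
  · simp
  · simp only [Bool.true_and]
    rcases hcase with h7 | ⟨hd0, hdlt⟩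
    · rw [Bool.eq_iff_iff]
      simp only [pvKilled, Bool.not_eq_true', Bool.and_eq_true, Bool.or_eq_false_iff,
        Bool.and_eq_false_iff, decide_eq_true_eq, decide_eq_false_iff_not]
      omega
    · by_cases hhi : msb ≤ (i : Int) ∧ 8 ≤ i
      · exfalso
        have : data.testBit i = false := by
          cases data with
          | ofNat d =>
            rw [pvTb_ofNat]
            apply Nat.testBit_eq_false_of_lt
            have hd : d < 2 ^ msb.toNat := by
              have h := hdlt
              rw [show ((2 : Int) ^ msb.toNat) = ((2 ^ msb.toNat : Nat) : Int) from by
                push_cast; ring] at h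
              rw [Int.ofNat_eq_natCast] at h
              exact_mod_cast h
            exact lt_of_lt_of_le hd (Nat.pow_le_pow_right (by norm_num) (by omega))
          | negSucc d => exact absurd hd0 (not_le.mpr (Int.negSucc_lt_zero d))
        rw [hdb] at this
        exact Bool.noConfusion this
      · rw [Bool.eq_iff_iff]
        simp only [pvKilled, Bool.not_eq_true', Bool.and_eq_true, Bool.or_eq_false_iff,
          Bool.and_eq_false_iff, decide_eq_true_eq, decide_eq_false_iff_not]
        omega

-- A's and B's shared guard reductions
lemma pvA_red (data msb lsb value : Int) (hlm : lsb ≤ msb)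
    (hv : value < (2 : Int) ^ (msb - lsb + 1).toNat) :
    set_bits data msb lsb value =
      PySem.Int.bxor (pvLoop data lsb msb) (value <<< lsb.toNat) := by
  unfold set_bits
  rw [if_neg (by omega), if_neg (not_le.mpr hv)]

lemma pvB_red (data msb lsb value : Int) (hlm : lsb ≤ msb)
    (hv : value < (2 : Int) ^ (msb - lsb + 1).toNat) :
    set_bits_alt data msb lsb value =
      PySem.Int.bxor (PySem.Int.band (PySem.Int.band data 255)
        (Int.not ((((1 : Int) <<< (msb - lsb + 1).toNat) - 1) <<< lsb.toNat)))
        (value <<< lsb.toNat) := by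
  unfold set_bits_alt
  rw [if_neg (by omega), if_neg (not_le.mpr hv)]

-- ===== VERDICT (by name: the statement is the Claim_ definition above) =====
theorem set_bits_spec : Claim_unchanged_set_bits := by
  intro data msb lsb value hDom hPre
  unfold Spec_set_bits
  intro hD
  obtain ⟨h0, hlm, hv⟩ := hPre
  rw [pvA_red data msb lsb value hlm hv, pvB_red data msb lsb value hlm hv]
  unfold D_set_bits at hD
  rw [not_and_or, not_or, not_and_or] at hD
  have hcase : lsb ≤ 7 ∨ (0 ≤ data ∧ data < (2 : Int) ^ msb.toNat) := by
    by_cases h7 : lsb ≤ 7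
    · exact Or.inl h7
    · obtain ⟨hd0, h31⟩ := hD.resolve_left (by omega)
      refine Or.inr ⟨not_lt.mp hd0, ?_⟩
      by_cases hm31 : msb ≤ 31
      · rcases h31 with h' | h'
        · exact absurd hm31 h'
        · exact not_le.mp h'
      · have hdval : data ≤ 2147483648 := by
          simp only [Dom_set_bits, pvDomInt, Bool.and_eq_true, decide_eq_true_eq] at hDom
          exact hDom.1.1.1.2
        calc data ≤ 2147483648 := hdval
          _ < (2 : Int) ^ 32 := by norm_num
          _ ≤ (2 : Int) ^ msb.toNat := by
            have h1 : ((2 ^ 32 : Nat) : Int) ≤ ((2 ^ msb.toNat : Nat) : Int) := by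
              exact_mod_cast Nat.pow_le_pow_right (by norm_num) (by omega)
            push_cast at h1
            exact h1
  rw [pvEq data lsb msb h0 hlm hcase]

theorem set_bits_changed : Claim_changed_set_bits := by
  unfold Claim_changed_set_bits
  decide

theorem set_bits_tight : Claim_exact_set_bits := by
  intro data msb lsb value hDom hPre hD heq
  obtain ⟨h0, hlm, hv⟩ := hPre
  obtain ⟨h8, hcase⟩ := hD
  rw [pvA_red data msb lsb value hlm hv, pvB_red data msb lsb value hlm hv] at heq
  have hLR := pvBxorCancel heq
  have hnot : ∀ (x : Int) (j : Nat), (Int.not x).testBit j = !x.testBit j := by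
    intro x j
    cases x with
    | ofNat m => rfl
    | negSucc m =>
      rw [show Int.not (Int.negSucc m) = Int.ofNat m from rfl, pvTb_ofNat, pvTb_negSucc,
        Bool.not_not]
  have h255 : ∀ j : Nat, (255 : Int).testBit j = decide (j < 8) := by
    intro j
    have h1 : (255 : Int) = Int.ofNat 255 := rfl
    have h2 : (255 : Nat) = 2 ^ 8 - 1 := by norm_num
    rw [h1, pvTb_ofNat, h2, Nat.testBit_two_pow_sub_one]
  -- a single differing bit position i refutes hLR
  have key : ∀ i : Nat, 8 ≤ i → msb ≤ (i : Int) → data.testBit i = true → False := by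
    intro i hi8 him hdb
    have hbits := congrArg (fun z => z.testBit i) hLR
    simp only [] at hbits
    rw [pvLoopTb (msb - lsb).toNat data lsb msb h0 (by omega) i, pvTbBand, pvTbBand,
      hnot, pvTbFieldMask lsb msb h0 hlm, h255] at hbits
    unfold pvKilled at hbits
    rw [hdb] at hbits
    simp only [show decide (lsb ≤ (7 : Int)) = false by simp; omega,
      show decide (i ≤ 7) = false by simp; omega,
      show decide ((i : Int) < msb) = false by simp; omega,
      show decide (i < 8) = false by simp; omega] at hbits
    simp at hbits
  rcases hcase with hneg | ⟨hm31, hple⟩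
  · cases data with
    | ofNat d =>
      exact absurd hneg (by rw [Int.ofNat_eq_natCast]; exact not_lt.mpr (Int.natCast_nonneg d))
    | negSucc d =>
      have hmn : ((msb.toNat : Int)) = msb := Int.toNat_of_nonneg (by omega)
      refine key (d + msb.toNat + 8) (by omega) (by push_cast; omega) ?_
      rw [pvTb_negSucc]
      have : d.testBit (d + msb.toNat + 8) = false :=
        Nat.testBit_eq_false_of_lt (lt_of_lt_of_le Nat.lt_two_pow_self
          (Nat.pow_le_pow_right (by norm_num) (by omega)))
      rw [this]
      rfl
  · have hd0 : (0 : Int) ≤ data := le_trans (by positivity) hple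
    cases data with
    | negSucc d => exact absurd hd0 (by simp [Int.negSucc_eq]; omega)
    | ofNat d =>
      have hdge : 2 ^ msb.toNat ≤ d := by
        have h := hple
        rw [show ((2 : Int) ^ msb.toNat) = ((2 ^ msb.toNat : Nat) : Int) from by
          push_cast; ring, Int.ofNat_eq_natCast] at h
        exact_mod_cast h
      have hdne : d ≠ 0 := by
        have : 0 < 2 ^ msb.toNat := Nat.two_pow_pos msb.toNat
        omega
      obtain ⟨i, hbit, hhigh⟩ := Nat.exists_most_significant_bit hdne
      have hmi : msb.toNat ≤ i := by
        by_contra hc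
        have hlt : d < 2 ^ (i + 1) :=
          Nat.lt_pow_two_of_testBit d (fun j hj => hhigh j (by omega))
        have : (2 : Nat) ^ (i + 1) ≤ 2 ^ msb.toNat :=
          Nat.pow_le_pow_right (by norm_num) (by omega)
        omega
      have hmn : ((msb.toNat : Int)) = msb := Int.toNat_of_nonneg (by omega)
      have hm8 : 8 ≤ msb.toNat := by omega
      exact key i (by omega) (by omega) hbit
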